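-- pv_equiv track=rewrite | github.com/16010948/Algorithm | Programmers/challenge10.py | find_110
-- ===== SOURCE A (Python) =====
-- def find_110(num):
--     stack = []
--     count = 0
--     for i in range(len(num)):
--         if len(stack) >= 2 and num[i] == '0' and stack[-2:] == ['1', '1']:
--             count += 1
--             stack.pop()
--             stack.pop()
--         else:
--             stack.append(num[i])
--     return (count, stack)
-- ===== SOURCE B (Python) =====
-- def find_110(num):
--     L = list(num)
--     count = 0
--     while True:
--         found = None
--         for i in range(len(L) - 2):
--             if L[i:i + 3] == ['1', '1', '0']:
--                 found = i
--                 break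
--         if found is None:
--             return (count, L)
--         del L[found:found + 3]
--         count += 1
-- ===== Notes on version B (the rewrite author's own statement) =====
-- stated objective: alternative
-- what changed: B replaces A's single left-to-right stack pass with repeated search-and-delete of the leftmost '110' window on a char list; the two agree by confluence of the 110-deletion rewrite.
import Mathlib
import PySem

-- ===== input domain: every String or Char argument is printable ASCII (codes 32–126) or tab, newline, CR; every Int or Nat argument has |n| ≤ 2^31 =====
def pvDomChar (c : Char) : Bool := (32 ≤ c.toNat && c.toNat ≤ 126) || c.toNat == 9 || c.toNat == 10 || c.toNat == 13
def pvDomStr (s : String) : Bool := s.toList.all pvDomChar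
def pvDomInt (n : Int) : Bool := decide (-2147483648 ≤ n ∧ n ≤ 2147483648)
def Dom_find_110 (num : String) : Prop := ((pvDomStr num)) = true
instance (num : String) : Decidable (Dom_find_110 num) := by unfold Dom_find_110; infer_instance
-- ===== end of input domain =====

-- B deletes the leftmost '110' window repeatedly instead of A's one-pass stack reduction; alternative algorithm, not faster.

-- ===== PORT A =====
-- one iteration of A's loop body: state is (count, stack), the current element is num[i]
def find110Step (st : Int × List String) (c : String) : Int × List String :=
  if st.2.length ≥ 2 ∧ c = "0" ∧ PySem.List.slice st.2 (some (-2)) none = ["1", "1"] then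
    (st.1 + 1, st.2.dropLast.dropLast)      -- count += 1; stack.pop(); stack.pop()
  else
    (st.1, st.2 ++ [c])                     -- stack.append(num[i])

def find_110 (num : String) : Int × List String :=
  (num.toList.map (fun c => String.singleton c)).foldl find110Step (0, [])

-- ===== PORT B =====
-- B's inner for-loop: index of the leftmost window L[i:i+3] == ['1','1','0'], if any
def find110Find : List String → Option Nat
  | x :: y :: z :: rest =>
    if x = "1" ∧ y = "1" ∧ z = "0" then some 0
    else (find110Find (y :: z :: rest)).map (· + 1)
  | _ => none

-- cited by find110Loop's decreasing_by
theorem find110Find_le {L : List String} {i : Nat} (h : find110Find L = some i) :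
    i + 3 ≤ L.length := by
  induction L generalizing i with
  | nil => simp [find110Find] at h
  | cons x t ih =>
    match t with
    | [] => simp [find110Find] at h
    | [y] => simp [find110Find] at h
    | y :: z :: r =>
      rw [find110Find] at h
      split at h
      · simp at h
        simp only [List.length_cons]
        omega
      · simp only [Option.map_eq_some_iff] at h
        obtain ⟨j, hj, rfl⟩ := h
        have := ih hj
        simp only [List.length_cons] at this ⊢
        omega

-- B's outer while-loop: delete the found window, count += 1, repeat
def find110Loop (L : List String) (count : Int) : Int × List String :=
  match h : find110Find L with
  | none => (count, L)
  | some i => find110Loop (L.take i ++ L.drop (i + 3)) (count + 1)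
termination_by L.length
decreasing_by
  have := find110Find_le h
  simp [List.length_take, List.length_drop]
  omega

def find_110_alt (num : String) : Int × List String :=
  find110Loop (num.toList.map (fun c => String.singleton c)) 0

-- ===== PRECONDITION & SPEC =====
def Spec_find_110 (num : String) (out : Int × List String) : Prop := out = find_110_alt num
instance (num : String) (out : Int × List String) : Decidable (Spec_find_110 num out) := by unfold Spec_find_110; infer_instance

-- ===== CLAIM (what is proved, stated in full; the proofs are below) =====
def Claim_equal_find_110 : Prop := ∀ (num : String), Dom_find_110 num → Spec_find_110 num (find_110 num)

-- ===== LEMMAS AND PROOFS =====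

-- "L contains the factor 110"
def Occ (L : List String) : Prop := ∃ u v, L = u ++ "1" :: "1" :: "0" :: v

theorem occ_append_right {L : List String} (x : String) (h : Occ L) : Occ (L ++ [x]) := by
  obtain ⟨u, v, rfl⟩ := h
  exact ⟨u, v ++ [x], by simp⟩

theorem find_none_not_occ {L : List String} (h : find110Find L = none) : ¬ Occ L := by
  induction L with
  | nil => rintro ⟨u, v, hu⟩; simp at hu
  | cons x t ih =>
    match t with
    | [] => rintro ⟨u, v, hu⟩; rcases u with _ | ⟨a, u⟩ <;> simp at hu
    | [y] =>
      rintro ⟨u, v, hu⟩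
      rcases u with _ | ⟨a, _ | ⟨b, u⟩⟩ <;> simp at hu
    | y :: z :: r =>
      rw [find110Find] at h
      split at h
      · simp at h
      · rename_i hne
        simp only [Option.map_eq_none_iff] at h
        rintro ⟨u, v, hu⟩
        rcases u with _ | ⟨a, u⟩
        · simp at hu
          exact hne ⟨hu.1, hu.2.1, hu.2.2.1⟩
        · simp at hu
          exact ih h ⟨u, v, hu.2⟩

-- soundness + minimality of the inner search
theorem find_some_split {L : List String} {i : Nat} (h : find110Find L = some i) :
    ∃ u v, L = u ++ "1" :: "1" :: "0" :: v ∧ u.length = i ∧ ¬ Occ u := by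
  induction L generalizing i with
  | nil => simp [find110Find] at h
  | cons x t ih =>
    match t with
    | [] => simp [find110Find] at h
    | [y] => simp [find110Find] at h
    | y :: z :: r =>
      rw [find110Find] at h
      split at h
      · rename_i hp
        obtain ⟨rfl, rfl, rfl⟩ := hp
        simp only [Option.some.injEq] at h
        exact ⟨[], r, by simp, by simp [← h], by rintro ⟨u, v, hu⟩; simp at hu⟩
      · rename_i hne
        simp only [Option.map_eq_some_iff] at h
        obtain ⟨j, hj, rfl⟩ := h
        obtain ⟨u, v, hsplit, hlen, hfree⟩ := ih hj
        refine ⟨x :: u, v, by simp [hsplit], by simp [hlen], ?_⟩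
        rintro ⟨u', v', hu⟩
        rcases u' with _ | ⟨a, u'⟩
        · -- occurrence at position 0 of x :: u : forces x = 1, y = 1, z = 0
          simp at hu
          obtain ⟨rfl, hu2⟩ := hu
          apply hne
          rcases u with _ | ⟨b, _ | ⟨c, u⟩⟩ <;> simp_all
        · simp at hu
          exact hfree ⟨u', v', hu.2⟩

-- A's pass leaves a 110-free word untouched
theorem foldl_step_free {L : List String} (h : ¬ Occ L) (c : Int) :
    List.foldl find110Step (c, []) L = (c, L) := by
  induction L using List.reverseRecOn with
  | nil => simp
  | append_singleton M x ih =>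
    have hM : ¬ Occ M := fun hm => h (occ_append_right x hm)
    rw [List.foldl_append, ih hM]
    simp only [List.foldl_cons, List.foldl_nil]
    rw [find110Step]
    split
    · rename_i hc
      obtain ⟨hlen, rfl, hsl⟩ := hc
      exfalso
      rw [PySem.List.slice_from_neg_ofNat M 2 (by omega)] at hsl
      apply h
      refine ⟨M.take (M.length - 2), [], ?_⟩
      conv_lhs => rw [← List.take_append_drop (M.length - 2) M, hsl]
      simp
    · rfl

-- one step shifts the count additively (the condition ignores the count)
theorem step_shift (c : Int) (s : List String) (x : String) :
    find110Step (c, s) x = ((find110Step (0, s) x).1 + c, (find110Step (0, s) x).2) := by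
  rw [find110Step, find110Step]
  split <;> simp
  ring

-- the whole pass shifts the count additively
theorem foldl_step_shift (L : List String) (c : Int) (s : List String) :
    List.foldl find110Step (c, s) L =
      ((List.foldl find110Step (0, s) L).1 + c, (List.foldl find110Step (0, s) L).2) := by
  induction L generalizing c s with
  | nil => simp
  | cons x t ih =>
    simp only [List.foldl_cons]
    rw [step_shift c s x, ih, ← Prod.mk.eta (p := find110Step (0, s) x),
      ih ((find110Step (0, s) x).1)]
    simp [Prod.ext_iff]
    ring

-- processing u ++ 110 ++ v from scratch = processing u ++ v with one extra count
theorem foldl_step_reduce {u : List String} (hu : ¬ Occ u) (c : Int) (v : List String) :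
    List.foldl find110Step (c, []) (u ++ "1" :: "1" :: "0" :: v) =
      List.foldl find110Step (c + 1, []) (u ++ v) := by
  rw [List.foldl_append, foldl_step_free hu c]
  rw [List.foldl_append, foldl_step_free hu (c + 1)]
  simp only [List.foldl_cons]
  have s1 : find110Step (c, u) "1" = (c, u ++ ["1"]) := by
    rw [find110Step]; split
    · rename_i hc; exact absurd hc.2.1 (by decide)
    · rfl
  have s2 : find110Step (c, u ++ ["1"]) "1" = (c, u ++ ["1", "1"]) := by
    rw [find110Step]; split
    · rename_i hc; exact absurd hc.2.1 (by decide)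
    · simp
  have s3 : find110Step (c, u ++ ["1", "1"]) "0" = (c + 1, u) := by
    rw [find110Step]; split
    · simp
    · rename_i hc
      exfalso; apply hc
      refine ⟨by simp, rfl, ?_⟩
      rw [PySem.List.slice_from_neg_ofNat _ 2 (by omega)]
      simp
  rw [s1, s2, s3]

theorem loop_eq (L : List String) (c : Int) :
    find110Loop L c =
      ((List.foldl find110Step (0, []) L).1 + c, (List.foldl find110Step (0, []) L).2) := by
  rw [find110Loop]
  split
  · rename_i h
    rw [foldl_step_free (find_none_not_occ h) 0]
    simp
  · rename_i i h
    obtain ⟨u, v, rfl, hlen, hfree⟩ := find_some_split h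
    have htake : ((u ++ "1" :: "1" :: "0" :: v).take i ++ (u ++ "1" :: "1" :: "0" :: v).drop (i + 3)) = u ++ v := by
      subst hlen
      simp [List.drop_append]
    rw [htake, loop_eq (u ++ v) (c + 1)]
    rw [foldl_step_reduce hfree 0 v, foldl_step_shift (u ++ v) (0 + 1) []]
    simp [Prod.ext_iff]
    ring
  termination_by L.length
  decreasing_by
    subst_vars
    simp only [List.length_append, List.length_cons]
    omega

-- ===== VERDICT (by name: the statement is the Claim_ definition above) =====
theorem find_110_spec : Claim_equal_find_110 := by
  intro num _
  unfold Spec_find_110 find_110 find_110_alt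
  rw [loop_eq]
  simp
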